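-- pv_equiv track=rewrite | github.com/I2PC/scipion-em-xmipp | xmipp3/protocols/protocol_consensus_classes3D.py | _calculateClassificationIntersections
-- ===== SOURCE A (Python) =====
-- def _calculateClassificationIntersections(classifications):
--     # Start with the first classification
--     result = classifications[0]
--
--     for i in range(1, len(classifications)):
--         classification = classifications[i]
--         intersections = []
--
--         # Perform the intersection with previous classes
--         for cls0 in result:
--             for cls1 in classification:
--                 intersection = cls0.intersection(cls1)
--                 if intersection:
--                     intersections.append(intersection)
--
--         # Use the new intersection for the next step
--         result = intersections
--
--     return result
-- ===== SOURCE B (Python) =====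
-- def _calculateClassificationIntersections(classifications):
--     # Common refinement via an element -> class-indices map per step:
--     # bucket each previous class's elements in one pass instead of
--     # intersecting every (cls0, cls1) pair.
--     result = classifications[0]
--     for classification in classifications[1:]:
--         # Map each element to the indices of the classes containing it
--         where = {}
--         for j, cls1 in enumerate(classification):
--             for x in cls1:
--                 where.setdefault(x, []).append(j)
--
--         new_result = []
--         for cls0 in result:
--             buckets = [[] for _ in classification]
--             for x in cls0:
--                 for j in where.get(x, ()):
--                     buckets[j].append(x)
--             for b in buckets:
--                 if b:
--                     new_result.append(set(b))
--
--         # Use the refined classes for the next step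
--         result = new_result
--     return result
-- ===== Notes on version B (the rewrite author's own statement) =====
-- stated objective: alternative
-- what changed: Instead of intersecting every (previous class, new class) pair, each step builds an element-to-class-index map once and buckets each previous class's elements in a single pass, emitting nonempty buckets in class-index order.
import Mathlib
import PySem

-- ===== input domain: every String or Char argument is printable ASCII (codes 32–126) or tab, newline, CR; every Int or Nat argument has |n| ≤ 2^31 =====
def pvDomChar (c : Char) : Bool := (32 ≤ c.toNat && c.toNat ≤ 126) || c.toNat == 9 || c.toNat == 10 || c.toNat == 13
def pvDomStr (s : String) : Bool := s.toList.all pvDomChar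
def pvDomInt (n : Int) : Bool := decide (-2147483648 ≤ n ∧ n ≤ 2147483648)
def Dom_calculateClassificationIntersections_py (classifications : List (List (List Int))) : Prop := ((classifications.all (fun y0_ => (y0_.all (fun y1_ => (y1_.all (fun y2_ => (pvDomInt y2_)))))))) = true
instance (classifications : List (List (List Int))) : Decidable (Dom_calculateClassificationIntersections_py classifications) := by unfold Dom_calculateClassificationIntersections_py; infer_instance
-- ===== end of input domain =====

-- B replaces the pairwise class-intersection loops by an element→class-index map and
-- one bucketing pass per previous class (alternative algorithm); return values only.

-- ===== PORT A =====
-- cls0.intersection(cls1): the elements of cls0 also in cls1 (exact as a set; inner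
-- lists encode Python sets, so only their members are significant)
def pyInter (cls0 cls1 : List Int) : List Int := cls0.filter (fun x => cls1.contains x)

def calculateClassificationIntersections_py (classifications : List (List (List Int))) : List (List Int) :=
  match classifications with
  | [] => []   -- Python raises IndexError on classifications[0]; excluded by Pre_
  | c0 :: rest =>
    rest.foldl (fun result classification =>
      result.foldl (fun intersections cls0 =>
        classification.foldl (fun intersections cls1 =>
          if (pyInter cls0 cls1).isEmpty then intersections
          else intersections ++ [pyInter cls0 cls1]) intersections) []) c0

-- ===== PORT B =====
-- where: for j, cls1 in enumerate(classification): for x in cls1: where.setdefault(x, []).append(j)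
def bWhere (classification : List (List Int)) : PySem.Dict Int (List Int) :=
  (PySem.List.enumerate classification).foldl
    (fun d p => p.2.foldl (fun d x => d.modify x [] (fun js => js ++ [p.1])) d)
    PySem.Dict.empty

-- for x in cls0: for j in where.get(x, ()): buckets[j].append(x)
-- (j comes from enumerate, so 0 ≤ j < len(classification): .toNat is exact here)
def bFill (w : PySem.Dict Int (List Int)) (buckets : List (List Int)) (cls0 : List Int) : List (List Int) :=
  cls0.foldl (fun b x =>
    (w.getD x []).foldl (fun b j => b.set j.toNat ((b.getD j.toNat []) ++ [x])) b) buckets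

def bStep (result classification : List (List Int)) : List (List Int) :=
  let w := bWhere classification
  result.foldl (fun newResult cls0 =>
    let buckets := bFill w (List.replicate classification.length []) cls0
    buckets.foldl (fun nr b => if b.isEmpty then nr else nr ++ [PySem.Set.ofList b]) newResult) []

def calculateClassificationIntersections_py_alt (classifications : List (List (List Int))) : List (List Int) :=
  match classifications with
  | [] => []   -- Python raises IndexError on classifications[0]; excluded by Pre_
  | c0 :: rest => rest.foldl bStep c0

-- ===== PRECONDITION & SPEC =====
-- Pre_ excludes the empty outer list (Python A raises IndexError on classifications[0]) and
-- requires each inner list to have distinct elements, which is exactly the encoding of the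
-- Python set[int] values the function receives (a set has no duplicate elements).
def Pre_calculateClassificationIntersections_py (classifications : List (List (List Int))) : Prop :=
  classifications ≠ [] ∧ ∀ cl ∈ classifications, ∀ cls ∈ cl, cls.Nodup
instance (classifications : List (List (List Int))) : Decidable (Pre_calculateClassificationIntersections_py classifications) := by unfold Pre_calculateClassificationIntersections_py; infer_instance
def pvWitness_calculateClassificationIntersections_py : List (List (List Int)) :=
  [[[1, 2, 3], [4]], [[1], [2, 4]]]
def Spec_calculateClassificationIntersections_py (classifications : List (List (List Int))) (out : List (List Int)) : Prop := out = calculateClassificationIntersections_py_alt classifications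
instance (classifications : List (List (List Int))) (out : List (List Int)) : Decidable (Spec_calculateClassificationIntersections_py classifications out) := by unfold Spec_calculateClassificationIntersections_py; infer_instance

-- ===== CLAIM (what is proved, stated in full; the proofs are below) =====
def Claim_equal_calculateClassificationIntersections_py : Prop := ∀ (classifications : List (List (List Int))), Dom_calculateClassificationIntersections_py classifications → Pre_calculateClassificationIntersections_py classifications → Spec_calculateClassificationIntersections_py classifications (calculateClassificationIntersections_py classifications)

-- ===== LEMMAS AND PROOFS =====
theorem getD_set' (b : List (List Int)) (j i : Nat) (v : List Int) : (b.set j v).getD i [] = if j = i ∧ j < b.length then v else b.getD i [] := by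
  simp only [List.getD_eq_getElem?_getD, List.getElem?_set]
  by_cases h : j = i
  · subst h
    by_cases hl : j < b.length
    · simp [hl]
    · simp [hl]
  · have h2 : ¬ (j = i ∧ j < b.length) := fun hh => h hh.1
    simp [h, h2]


theorem foldl_set_getD (js : List Int) (b : List (List Int)) (x : Int)
    (hnd : js.Nodup) (hb : ∀ j ∈ js, 0 ≤ j ∧ j.toNat < b.length) (i : Nat) (hi : i < b.length) :
    (js.foldl (fun b j => b.set j.toNat ((b.getD j.toNat []) ++ [x])) b).getD i []
      = b.getD i [] ++ (if (i : Int) ∈ js then [x] else []) := by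
  induction js generalizing b with
  | nil => simp
  | cons j t ih =>
    have hj := hb j (by simp)
    have hlen : (b.set j.toNat ((b.getD j.toNat []) ++ [x])).length = b.length := by simp
    rw [List.foldl_cons, ih _ hnd.of_cons (fun j' hj' => by rw [hlen]; exact hb j' (by simp [hj'])) (by rw [hlen]; exact hi)]
    rw [getD_set']
    by_cases hji : (i : Int) = j
    · have hjt : j.toNat = i := by omega
      have hnotin : (i : Int) ∉ t := by rw [hji]; exact (List.nodup_cons.mp hnd).1
      simp [hi, hnotin, hji.symm]
    · have hjt : ¬ (j.toNat = i ∧ j.toNat < b.length) := by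
        rintro ⟨h1, _⟩; exact hji (by omega)
      simp only [hjt, if_false, List.mem_cons]
      have hne : ¬ (i : Int) = j := hji
      simp [hne]

theorem foldl_set_length (js : List Int) (b : List (List Int)) (x : Int) :
    (js.foldl (fun b j => b.set j.toNat ((b.getD j.toNat []) ++ [x])) b).length = b.length := by
  induction js generalizing b with
  | nil => rfl
  | cons j t ih => rw [List.foldl_cons, ih]; simp

theorem map_filter_eq_flatMap {α β : Type} (l : List α) (q : α → Bool) (f : α → β) :
    (l.filter q).map f = l.flatMap (fun p => if q p then [f p] else []) := by
  induction l with
  | nil => rfl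
  | cons a t ih => simp [List.filter_cons, List.flatMap_cons, ← ih]; split <;> simp

theorem per_class (cls : List Int) (j x : Int) (hnd : cls.Nodup) :
    ((cls.map (fun y => (y, j))).filter (fun q => q.1 == x)).map (fun q => q.2)
      = if cls.contains x then [j] else [] := by
  rw [List.filter_map, List.map_map]
  have h : ((fun (q : Int × Int) => q.1 == x) ∘ (fun y => (y, j))) = (fun y => y == x) := rfl
  rw [h, List.filter_beq]
  by_cases hm : x ∈ cls
  · rw [List.count_eq_one_of_mem hnd hm]; simp [hm]
  · rw [List.count_eq_zero_of_not_mem hm]; simp [hm]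

theorem bWhere_getD (c : List (List Int)) (hnd : ∀ cls ∈ c, cls.Nodup) (x : Int) :
    (bWhere c).getD x []
      = ((PySem.List.enumerate c).filter (fun p => p.2.contains x)).map (fun p => p.1) := by
  unfold bWhere
  have h1 : ∀ (d : PySem.Dict Int (List Int)), ∀ p ∈ PySem.List.enumerate c,
      p.2.foldl (fun d x => d.modify x [] (fun js => js ++ [p.1])) d
        = (p.2.map (fun y => (y, p.1))).foldl (fun d q => d.modify q.1 [] (fun js => js ++ [q.2])) d := by
    intro d p _; rw [List.foldl_map]
  rw [PySem.List.foldl_congr_mem _ _ _ _ h1, ← List.foldl_flatMap,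
      PySem.Dict.getD_foldl_modify_append, List.filter_flatMap, List.map_flatMap,
      map_filter_eq_flatMap]
  simp only [PySem.Dict.getD_empty, List.nil_append]
  apply List.flatMap_congr
  intro p hp
  have hmem : p.2 ∈ c := by
    have := (PySem.List.mem_enumerate_iff c 0 p).mp hp
    obtain ⟨k, hk, rfl⟩ := this
    simp
  exact per_class p.2 p.1 x (hnd _ hmem)

theorem js_nodup (c : List (List Int)) (x : Int) :
    (((PySem.List.enumerate c).filter (fun p => p.2.contains x)).map (fun p => p.1)).Nodup := by
  have h := PySem.List.pairwise_lt_enumerate c 0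
  have h2 : (((PySem.List.enumerate c).filter (fun p => p.2.contains x)).map (fun p => p.1)).Pairwise (· < ·) :=
    List.Pairwise.map _ (fun a b hlt => hlt) (h.filter _)
  unfold List.Nodup
  exact h2.imp ne_of_lt

theorem js_bounds (c : List (List Int)) (x : Int) (j : Int)
    (hj : j ∈ ((PySem.List.enumerate c).filter (fun p => p.2.contains x)).map (fun p => p.1)) :
    0 ≤ j ∧ j.toNat < c.length := by
  simp only [List.mem_map, List.mem_filter] at hj
  obtain ⟨p, ⟨hp, _⟩, rfl⟩ := hj
  obtain ⟨k, hk, rfl⟩ := (PySem.List.mem_enumerate_iff c 0 p).mp hp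
  constructor
  · simp
  · simp; omega

theorem js_mem (c : List (List Int)) (x : Int) (i : Nat) (hi : i < c.length) :
    ((i : Int) ∈ ((PySem.List.enumerate c).filter (fun p => p.2.contains x)).map (fun p => p.1))
      ↔ ((c.getD i []).contains x = true) := by
  simp only [List.mem_map, List.mem_filter]
  constructor
  · rintro ⟨p, ⟨hp, hc⟩, hfst⟩
    obtain ⟨k, hk, rfl⟩ := (PySem.List.mem_enumerate_iff c 0 p).mp hp
    simp only at hfst hc
    have hki : k = i := by omega
    subst hki
    rwa [List.getD_eq_getElem c [] hk]
  · intro hc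
    refine ⟨((i : Int), c.getD i []), ⟨?_, hc⟩, rfl⟩
    refine (PySem.List.mem_enumerate_iff c 0 _).mpr ⟨i, hi, ?_⟩
    rw [List.getD_eq_getElem c [] hi]
    simp

theorem bFill_length (w : PySem.Dict Int (List Int)) (b : List (List Int)) (cls0 : List Int) :
    (bFill w b cls0).length = b.length := by
  induction cls0 generalizing b with
  | nil => rfl
  | cons x xs ih =>
    show (bFill w _ xs).length = _
    rw [ih, foldl_set_length]

theorem bFill_getD (c : List (List Int)) (hnd : ∀ cls ∈ c, cls.Nodup) (cls0 : List Int)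
    (b : List (List Int)) (hb : b.length = c.length) (i : Nat) (hi : i < c.length) :
    (bFill (bWhere c) b cls0).getD i []
      = b.getD i [] ++ cls0.filter (fun x => (c.getD i []).contains x) := by
  induction cls0 generalizing b with
  | nil => simp [bFill]
  | cons x xs ih =>
    have hjs := bWhere_getD c hnd x
    have hstep : (((bWhere c).getD x []).foldl
        (fun b j => b.set j.toNat ((b.getD j.toNat []) ++ [x])) b).getD i []
        = b.getD i [] ++ (if (c.getD i []).contains x then [x] else []) := by
      rw [foldl_set_getD _ _ _ (by rw [hjs]; exact js_nodup c x)
            (fun j hj => by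
              have := js_bounds c x j (hjs ▸ hj)
              omega)
            i (by omega)]
      rw [hjs]
      have hiff := js_mem c x i hi
      by_cases hmem : (i : Int) ∈ ((PySem.List.enumerate c).filter (fun p => p.2.contains x)).map (fun p => p.1)
      · rw [if_pos hmem, if_pos (hiff.mp hmem)]
      · have hnc : ¬ (c.getD i []).contains x = true := fun h => hmem (hiff.mpr h)
        rw [if_neg hmem, if_neg hnc]
    show (bFill (bWhere c) _ xs).getD i [] = _
    rw [ih _ (by rw [foldl_set_length]; exact hb), hstep, List.filter_cons]
    by_cases hx : (c.getD i []).contains x = true <;>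
      simp only [hx, if_true, if_false, Bool.false_eq_true]
    · rw [List.append_assoc]; rfl
    · rw [List.append_nil]

theorem bFill_eq_map (c : List (List Int)) (hnd : ∀ cls ∈ c, cls.Nodup) (cls0 : List Int) :
    bFill (bWhere c) (List.replicate c.length []) cls0 = c.map (fun cls1 => pyInter cls0 cls1) := by
  apply List.ext_getElem
  · rw [bFill_length]; simp
  · intro i h1 h2
    have hi : i < c.length := by simpa using h2
    have hlen : (bFill (bWhere c) (List.replicate c.length []) cls0).length = c.length := by
      rw [bFill_length]; simp
    rw [← List.getD_eq_getElem _ [] h1, bFill_getD c hnd cls0 _ (by simp) i hi]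
    simp only [pyInter, List.getD_eq_getElem?_getD, List.nil_append, List.getElem_map,
      List.getElem?_eq_getElem hi, Option.getD_some, List.getElem?_replicate, hi, if_pos,
      List.nil_append]

theorem flip_if {α β : Type} (q : α → Bool) (f : α → β) (l : List α) (acc : List β) :
    l.foldl (fun acc y => if q y then acc else acc ++ [f y]) acc
      = acc ++ (l.filter (fun y => !q y)).map f := by
  rw [← PySem.List.foldl_append_if (fun y => !q y) f l acc]
  apply PySem.List.foldl_congr_mem
  intro a y _
  by_cases h : q y <;> simp [h]

theorem bStep_eq (result c : List (List Int)) (hnd : ∀ cls ∈ c, cls.Nodup)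
    (hr : ∀ cls ∈ result, cls.Nodup) :
    bStep result c
      = result.foldl (fun intersections cls0 =>
          c.foldl (fun intersections cls1 =>
            if (pyInter cls0 cls1).isEmpty then intersections
            else intersections ++ [pyInter cls0 cls1]) intersections) [] := by
  unfold bStep
  apply PySem.List.foldl_congr_mem
  intro acc cls0 hcls0
  rw [bFill_eq_map c hnd cls0, List.foldl_map, flip_if, flip_if]
  congr 1
  apply List.map_congr_left
  intro cls1 hcls1
  apply PySem.Set.ofList_eq_self_of_nodup
  exact (hr cls0 hcls0).filter _

theorem stepA_nodup (result c : List (List Int)) (hr : ∀ cls ∈ result, cls.Nodup) :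
    ∀ cls ∈ result.foldl (fun intersections cls0 =>
          c.foldl (fun intersections cls1 =>
            if (pyInter cls0 cls1).isEmpty then intersections
            else intersections ++ [pyInter cls0 cls1]) intersections) [], cls.Nodup := by
  intro cls hcls
  rw [PySem.List.foldl_congr_mem _ _ (fun acc cls0 => acc ++ ((c.filter (fun y => !(pyInter cls0 y).isEmpty)).map (pyInter cls0))) _ (fun acc cls0 _ => flip_if _ _ _ _),
      PySem.List.foldl_append_eq_flatMap] at hcls
  simp only [List.nil_append, List.mem_flatMap, List.mem_map] at hcls
  obtain ⟨cls0, hcls0, cls1, _, rfl⟩ := hcls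
  exact (hr cls0 hcls0).filter _

theorem main_fold (rest : List (List (List Int))) (r : List (List Int))
    (hnd : ∀ cl ∈ rest, ∀ cls ∈ cl, cls.Nodup) (hr : ∀ cls ∈ r, cls.Nodup) :
    rest.foldl bStep r
      = rest.foldl (fun result classification =>
          result.foldl (fun intersections cls0 =>
            classification.foldl (fun intersections cls1 =>
              if (pyInter cls0 cls1).isEmpty then intersections
              else intersections ++ [pyInter cls0 cls1]) intersections) []) r := by
  induction rest generalizing r with
  | nil => rfl
  | cons c rs ih =>
    rw [List.foldl_cons, List.foldl_cons, bStep_eq r c (hnd c (by simp)) hr]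
    exact ih _ (fun cl hcl => hnd cl (by simp [hcl])) (stepA_nodup r c hr)

-- ===== VERDICT (by name: the statement is the Claim_ definition above) =====
theorem calculateClassificationIntersections_py_spec : Claim_equal_calculateClassificationIntersections_py := by
  intro classifications _ hpre
  unfold Spec_calculateClassificationIntersections_py
  rcases classifications with _ | ⟨c0, rest⟩
  · exact absurd rfl hpre.1
  · show rest.foldl (fun result classification =>
        result.foldl (fun intersections cls0 =>
          classification.foldl (fun intersections cls1 =>
            if (pyInter cls0 cls1).isEmpty then intersections
            else intersections ++ [pyInter cls0 cls1]) intersections) []) c0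
      = rest.foldl bStep c0
    exact (main_fold rest c0 (fun cl hcl => hpre.2 cl (by simp [hcl]))
      (hpre.2 c0 (by simp))).symm
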